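-- pv_equiv track=rewrite | github.com/Tempret/computor-v1.0 | modules/class_Equation.py | _make_signes
-- ===== SOURCE A (Python) =====
-- def _make_signes(two_sides):
--
-- 	signes = list(filter(lambda x: x,
-- 			 list(map(lambda x: x if (x == '-' or x == '+' or x == '=') else None, two_sides.strip()))))
--
-- 	index = signes.index('=') + 1
--
-- 	while index < len(signes):
-- 		if signes[index] == '+':
-- 			signes[index] = '-'
-- 		elif signes[index] == '-':
-- 			signes[index] = '+'
-- 		index += 1
--
-- 	del signes[signes.index('=')]
--
-- 	return signes
-- ===== SOURCE B (Python) =====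
-- def _make_signes(two_sides):
-- 	signes = []
-- 	after_equals = False
-- 	for ch in two_sides.strip():
-- 		if ch == '=':
-- 			if after_equals:
-- 				signes.append('=')
-- 			else:
-- 				after_equals = True
-- 		elif ch == '+':
-- 			signes.append('-' if after_equals else '+')
-- 		elif ch == '-':
-- 			signes.append('+' if after_equals else '-')
-- 	if not after_equals:
-- 		raise ValueError("'=' is not in list")
-- 	return signes
-- ===== Notes on version B (the rewrite author's own statement) =====
-- stated objective: simpler
-- what changed: Replaces A's map/filter pass plus index() scans and an in-place index-mutating while loop by one left-to-right pass with an after_equals flag that emits each sign (flipped after the first '='), dropping the first '=' as it is seen.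
import Mathlib
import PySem

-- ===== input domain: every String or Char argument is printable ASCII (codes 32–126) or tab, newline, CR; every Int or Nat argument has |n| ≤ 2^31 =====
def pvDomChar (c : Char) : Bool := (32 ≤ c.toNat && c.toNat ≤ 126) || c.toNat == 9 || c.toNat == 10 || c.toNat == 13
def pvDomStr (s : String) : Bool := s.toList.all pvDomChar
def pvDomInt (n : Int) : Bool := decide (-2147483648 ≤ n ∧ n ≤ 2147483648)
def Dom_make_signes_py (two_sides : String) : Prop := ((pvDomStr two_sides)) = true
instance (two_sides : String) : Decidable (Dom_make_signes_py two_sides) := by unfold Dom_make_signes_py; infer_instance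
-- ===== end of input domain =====

-- B replaces A's sign extraction + two index() scans + in-place flipping while loop
-- by a single pass with an after_equals flag (objective: simpler; not measurably faster).

-- ===== PORT A =====
-- the in-place while loop flipping signs after position `index`
def pvLoopA (signes : List String) (index : Nat) : List String :=
  if h : index < signes.length then
    if signes[index]! == "+" then pvLoopA (signes.set index "-") (index + 1)
    else if signes[index]! == "-" then pvLoopA (signes.set index "+") (index + 1)
    else pvLoopA signes (index + 1)
  else signes
termination_by signes.length - index
decreasing_by all_goals ((try simp); omega)

def make_signes_py (two_sides : String) : List String :=
  let signes : List String :=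
    (((PySem.Str.strip two_sides).toList.map
        (fun x => if x == '-' || x == '+' || x == '=' then some (String.ofList [x]) else none)).filterMap id)
  match PySem.List.index? signes "=" with
  | none => []   -- Python raises ValueError here; excluded by Pre_make_signes_py
  | some i =>
    let signes := pvLoopA signes (i + 1)
    match PySem.List.index? signes "=" with
    | none => signes
    | some j => signes.eraseIdx j

-- ===== PORT B =====
-- one pass: state (output list so far, after_equals flag)
def pvStepB (acc : List String × Bool) (c : Char) : List String × Bool :=
  if c == '=' then
    if acc.2 then (acc.1 ++ ["="], true) else (acc.1, true)
  else if c == '+' then (acc.1 ++ [if acc.2 then "-" else "+"], acc.2)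
  else if c == '-' then (acc.1 ++ [if acc.2 then "+" else "-"], acc.2)
  else acc

def make_signes_py_alt (two_sides : String) : List String :=
  let r := (PySem.Str.strip two_sides).toList.foldl pvStepB ([], false)
  if r.2 then r.1 else []   -- Python raises ValueError here; excluded by Pre_make_signes_py

-- ===== PRECONDITION & SPEC =====
-- Pre_ excludes exactly the strings with no '=' (strip removes only whitespace), on which A's
-- signes.index('=') raises ValueError.
def Pre_make_signes_py (two_sides : String) : Prop :=
  '=' ∈ (PySem.Str.strip two_sides).toList
instance (two_sides : String) : Decidable (Pre_make_signes_py two_sides) := by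
  unfold Pre_make_signes_py; infer_instance
def pvWitness_make_signes_py : String := "1 + 2 = -3"

def Spec_make_signes_py (two_sides : String) (out : List String) : Prop := out = make_signes_py_alt two_sides
instance (two_sides : String) (out : List String) : Decidable (Spec_make_signes_py two_sides out) := by unfold Spec_make_signes_py; infer_instance

-- ===== CLAIM (what is proved, stated in full; the proofs are below) =====
def Claim_equal_make_signes_py : Prop := ∀ (two_sides : String), Dom_make_signes_py two_sides → Pre_make_signes_py two_sides → Spec_make_signes_py two_sides (make_signes_py two_sides)

-- ===== LEMMAS AND PROOFS =====

-- sign-flipping on the string level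
def pvFlip (s : String) : String := if s = "+" then "-" else if s = "-" then "+" else s

theorem pvFlipEqS : pvFlip "=" = "=" := by decide
theorem pvFlipPlus : pvFlip "+" = "-" := by decide
theorem pvFlipMinus : pvFlip "-" = "+" := by decide
theorem pvMkEq : String.ofList ['='] = "=" := rfl
theorem pvMkPlus : String.ofList ['+'] = "+" := rfl
theorem pvMkMinus : String.ofList ['-'] = "-" := rfl

-- A's first pass as a filterMap
def pvSig? (x : Char) : Option String :=
  if x == '-' || x == '+' || x == '=' then some (String.ofList [x]) else none

def pvSigs (cs : List Char) : List String := cs.filterMap pvSig?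

-- B's loop as a structural recursion (cons form of the foldl)
def pvG : List Char → Bool → List String × Bool
  | [], a => ([], a)
  | c :: t, a =>
    if c == '=' then
      (if a then (("=") :: (pvG t true).1, (pvG t true).2) else pvG t true)
    else if c == '+' then ((if a then "-" else "+") :: (pvG t a).1, (pvG t a).2)
    else if c == '-' then ((if a then "+" else "-") :: (pvG t a).1, (pvG t a).2)
    else pvG t a

theorem pvFold_eq_g (cs : List Char) : ∀ (out : List String) (a : Bool),
    cs.foldl pvStepB (out, a) = (out ++ (pvG cs a).1, (pvG cs a).2) := by
  induction cs with
  | nil => intro out a; simp [pvG]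
  | cons c t ih =>
    intro out a
    simp only [List.foldl_cons, pvStepB, pvG]
    split_ifs with h1 h2 h3 <;> simp [ih]

theorem pvG_true (cs : List Char) : pvG cs true = ((pvSigs cs).map pvFlip, true) := by
  induction cs with
  | nil => simp [pvG, pvSigs]
  | cons c t ih =>
    by_cases h1 : c = '='
    · subst h1
      simp [pvG, pvSigs, pvSig?, ih, pvMkEq, pvFlipEqS]
    · by_cases h2 : c = '+'
      · subst h2
        simp [pvG, pvSigs, pvSig?, ih, pvMkPlus, pvFlipPlus]
      · by_cases h3 : c = '-'
        · subst h3
          simp [pvG, pvSigs, pvSig?, ih, pvMkMinus, pvFlipMinus]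
        · simp [pvG, pvSigs, pvSig?, h1, h2, h3, ih]

theorem pvG_false_split : ∀ (u : List Char), '=' ∉ u → ∀ (v : List Char),
    pvG (u ++ '=' :: v) false = (pvSigs u ++ ((pvSigs v).map pvFlip), true) := by
  intro u
  induction u with
  | nil => intro _ v; simp [pvG, pvSigs, pvG_true]
  | cons c t ih =>
    intro hne v
    have hc : c ≠ '=' := fun h => hne (by simp [h])
    have ht : '=' ∉ t := fun h => hne (List.mem_cons_of_mem _ h)
    by_cases h2 : c = '+'
    · subst h2; simp [pvG, pvSigs, pvSig?, ih ht v, pvMkPlus]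
    · by_cases h3 : c = '-'
      · subst h3; simp [pvG, pvSigs, pvSig?, ih ht v, pvMkMinus]
      · simp [pvG, pvSigs, pvSig?, hc, h2, h3, ih ht v]

theorem pvSig?_eq_some_eq (c : Char) : pvSig? c = some "=" ↔ c = '=' := by
  constructor
  · intro h
    unfold pvSig? at h
    by_cases hs : (c == '-' || c == '+' || c == '=') = true
    · rw [if_pos hs] at h
      have := congrArg String.toList (Option.some.inj h)
      simpa using this
    · rw [if_neg hs] at h; simp at h
  · intro h; subst h; decide

theorem pvMem_sigs (w : List Char) : "=" ∈ pvSigs w ↔ '=' ∈ w := by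
  simp [pvSigs, List.mem_filterMap, pvSig?_eq_some_eq]

theorem pvTake_len_succ (pre : List String) (x : String) (s : List String) :
    (pre ++ x :: s).take (pre.length + 1) = pre ++ [x] := by
  induction pre with
  | nil => simp
  | cons a t ih => simp [ih]

theorem pvDrop_len_succ (pre : List String) (x : String) (s : List String) :
    (pre ++ x :: s).drop (pre.length + 1) = s := by
  induction pre with
  | nil => simp
  | cons a t ih => simp [ih]

theorem pvEraseIdx_len (pre : List String) (x : String) (s : List String) :
    (pre ++ x :: s).eraseIdx pre.length = pre ++ s := by
  induction pre with
  | nil => simp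
  | cons a t ih => simp [ih]

theorem pvTake_n_succ (pre : List String) (x : String) (s : List String) (n : Nat)
    (h : pre.length = n) : (pre ++ x :: s).take (n + 1) = pre ++ [x] := by
  subst h; exact pvTake_len_succ pre x s

theorem pvDrop_n_succ (pre : List String) (x : String) (s : List String) (n : Nat)
    (h : pre.length = n) : (pre ++ x :: s).drop (n + 1) = s := by
  subst h; exact pvDrop_len_succ pre x s

theorem pvSet_take_drop (l : List String) (i : Nat) (h : i < l.length) (v : String) :
    (l.set i v).take (i + 1) = l.take i ++ [v] ∧ (l.set i v).drop (i + 1) = l.drop (i + 1) := by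
  have hlen : (l.take i).length = i := by simp [Nat.le_of_lt h]
  have hdec : l.set i v = l.take i ++ v :: l.drop (i + 1) := by
    rw [List.set_eq_take_append_cons_drop]; rw [if_pos h]
  exact ⟨by rw [hdec, pvTake_n_succ _ _ _ _ hlen],
         by rw [hdec, pvDrop_n_succ _ _ _ _ hlen]⟩

theorem pvLoopA_eq (l : List String) (i : Nat) :
    pvLoopA l i = l.take i ++ (l.drop i).map pvFlip := by
  fun_induction pvLoopA l i with
  | case1 l i h hplus ih =>
    have hg : l[i]! = l[i] := getElem!_pos l i h
    have hv : l[i] = "+" := by rw [← hg]; exact beq_iff_eq.mp hplus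
    obtain ⟨ht, hd⟩ := pvSet_take_drop l i h "-"
    rw [ih, ht, hd, List.drop_eq_getElem_cons h, hv]
    simp [pvFlipPlus]
  | case2 l i h hplus hminus ih =>
    have hg : l[i]! = l[i] := getElem!_pos l i h
    have hv : l[i] = "-" := by rw [← hg]; exact beq_iff_eq.mp hminus
    obtain ⟨ht, hd⟩ := pvSet_take_drop l i h "+"
    rw [ih, ht, hd, List.drop_eq_getElem_cons h, hv]
    simp [pvFlipMinus]
  | case3 l i h hplus hminus ih =>
    have hg : l[i]! = l[i] := getElem!_pos l i h
    have hfix : pvFlip l[i] = l[i] := by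
      unfold pvFlip
      rw [if_neg (by rw [← hg]; exact fun hh => hplus (by simp [hh])),
          if_neg (by rw [← hg]; exact fun hh => hminus (by simp [hh]))]
    have ht1 : l.take (i + 1) = l.take i ++ (l.drop i).take 1 := List.take_add ..
    rw [ih, ht1, List.drop_eq_getElem_cons h]
    simp only [List.take_succ_cons, List.take_zero, List.map_cons, hfix,
      List.append_assoc, List.singleton_append]
  | case4 l i h =>
    have hle : l.length ≤ i := Nat.le_of_not_lt h
    rw [List.take_of_length_le hle, List.drop_eq_nil_of_le hle]
    simp

theorem pvSigs_append (u v : List Char) : pvSigs (u ++ v) = pvSigs u ++ pvSigs v := by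
  simp [pvSigs]

-- ===== VERDICT (by name: the statement is the Claim_ definition above) =====
theorem make_signes_py_spec : Claim_equal_make_signes_py := by
  intro s _hdom hpre
  unfold Spec_make_signes_py make_signes_py make_signes_py_alt Pre_make_signes_py at *
  set cs := (PySem.Str.strip s).toList with hcs
  -- split cs at the first '='
  have hmem : '=' ∈ cs := hpre
  obtain ⟨k, hk⟩ : ∃ k, PySem.List.index? cs '=' = some k := by
    have hsome : (PySem.List.index? cs '=').isSome = true := by
      rw [PySem.List.index?_isSome_iff]; exact hmem
    exact ⟨(PySem.List.index? cs '=').get hsome, (Option.some_get hsome).symm⟩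
  obtain ⟨u, v, hsplit, _hlen, hnot⟩ := (PySem.List.index?_eq_some_iff cs '=' k).mp hk
  -- B's side
  have hB : cs.foldl pvStepB ([], false) = (pvSigs u ++ (pvSigs v).map pvFlip, true) := by
    rw [hsplit, pvFold_eq_g, pvG_false_split u hnot v]; simp
  -- A's side
  have hsig : (cs.map
      (fun x => if x == '-' || x == '+' || x == '=' then some (String.ofList [x]) else none)).filterMap id
      = pvSigs cs := by
    rw [List.filterMap_map]
    simp only [pvSigs, pvSig?, Function.comp_def, id]
  have hne : "=" ∉ pvSigs u := fun h => hnot ((pvMem_sigs u).mp h)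
  have hdecomp : pvSigs cs = pvSigs u ++ "=" :: pvSigs v := by
    rw [hsplit, pvSigs_append]
    congr 1
  have hidx1 : PySem.List.index? (pvSigs cs) "=" = some (pvSigs u).length := by
    rw [PySem.List.index?_eq_some_iff]
    exact ⟨pvSigs u, pvSigs v, hdecomp, rfl, hne⟩
  have hloop : pvLoopA (pvSigs cs) ((pvSigs u).length + 1)
      = pvSigs u ++ "=" :: (pvSigs v).map pvFlip := by
    rw [pvLoopA_eq, hdecomp, pvTake_len_succ, pvDrop_len_succ]
    simp
  have hidx2 : PySem.List.index? (pvSigs u ++ "=" :: (pvSigs v).map pvFlip) "="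
      = some (pvSigs u).length := by
    rw [PySem.List.index?_eq_some_iff]
    exact ⟨pvSigs u, (pvSigs v).map pvFlip, rfl, rfl, hne⟩
  simp only [hsig, hidx1, hloop, hidx2, hB, if_pos, pvEraseIdx_len]
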